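-- pv_equiv track=rewrite | github.com/leetaewoo123/algorithm | 프로그래머스/unrated/155652. 둘만의 암호/둘만의 암호.py | solution
-- ===== SOURCE A (Python) =====
-- def solution(s, skip, index):
--     ## 97~122
--     answer = ''
--
--     for i in s:
--         j = index
--         while j >0:
--             i = chr(ord(i)+1)
--             if ord(i)>122:
--                 i = chr(ord(i)%122+96)
--             if i in skip:
--                 continue
--             else: j -=1
--
--         answer += i
--
--
--     return answer
-- ===== SOURCE B (Python) =====
-- def solution(s, skip, index):
--     if index <= 0:
--         return s
--     cyc = [o for o in range(97, 123) if chr(o) not in skip]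
--     m = len(cyc)
--     out = []
--     for c in s:
--         e = ord(c) + 1
--         if e > 122:
--             e = e % 122 + 96
--         pre = [p for p in range(e, 123) if chr(p) not in skip]
--         k = len(pre)
--         if index <= k:
--             out.append(chr(pre[index - 1]))
--         else:
--             out.append(chr(cyc[(index - k - 1) % m]))
--     return ''.join(out)
-- ===== Notes on version B (the rewrite author's own statement) =====
-- stated objective: faster
-- what changed: A steps each character forward one letter at a time, index times (skipping skip letters); B precomputes the allowed-lowercase cycle once and picks each output character by counting the straight segment after the character and indexing the cycle with modular arithmetic, O(1) per character instead of O(index).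
-- outside the precondition, e.g. on solution(' ', 'abcdefghijklmnopqrstuvwxyz', 1): A returns '!', B returns '!'
import Mathlib
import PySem

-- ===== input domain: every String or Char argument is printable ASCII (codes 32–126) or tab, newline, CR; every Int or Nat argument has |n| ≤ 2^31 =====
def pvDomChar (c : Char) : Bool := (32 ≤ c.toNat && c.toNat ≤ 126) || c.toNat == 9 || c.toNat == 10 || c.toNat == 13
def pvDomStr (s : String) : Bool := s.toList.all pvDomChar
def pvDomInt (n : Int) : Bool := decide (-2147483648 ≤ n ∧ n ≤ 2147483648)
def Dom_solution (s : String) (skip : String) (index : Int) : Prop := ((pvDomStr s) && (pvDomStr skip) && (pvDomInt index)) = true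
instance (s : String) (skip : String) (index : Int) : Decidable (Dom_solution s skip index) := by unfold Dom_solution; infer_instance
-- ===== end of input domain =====

-- B replaces A's per-character O(index) stepping loop by a closed-form pick: count the
-- allowed codes on the straight segment after the character, then index the allowed
-- lowercase cycle with modular arithmetic.

-- ===== PORT A =====
-- i = chr(ord(i)+1); if ord(i) > 122: i = chr(ord(i) % 122 + 96)
def stepA (c : Char) : Char :=
  let i := Char.ofNat (c.toNat + 1)
  if i.toNat > 122 then Char.ofNat (i.toNat % 122 + 96) else i

-- the 'while j > 0' loop of A.  Fuel is added only because Python's loop diverges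
-- when skip contains every lowercase letter (those inputs are outside Pre_solution);
-- under Pre_solution the fuel chosen in `solution` is provably sufficient.
-- 'i in skip' with i a single character is exactly character membership.
def loopA (skip : List Char) : Nat → Char → Int → Char
  | 0, i, _ => i
  | f + 1, i, j =>
    if j > 0 then
      let i' := stepA i
      if skip.contains i' then loopA skip f i' j
      else loopA skip f i' (j - 1)
    else i

def solution (s : String) (skip : String) (index : Int) : String :=
  s.toList.foldl (fun answer i => answer.push (loopA skip.toList (27 * index.toNat + 120) i index)) ""

-- ===== PORT B =====
-- transliteration of Source B; both indexings are in range in their branch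
-- (1 ≤ index ≤ k, resp. mod m with m > 0), so getD / Nat-mod are exact there.
def solution_alt (s : String) (skip : String) (index : Int) : String :=
  if index ≤ 0 then s
  else
    let cyc := (List.range' 97 26).filter (fun o => !(skip.toList.contains (Char.ofNat o)))
    let m := cyc.length
    String.ofList (s.toList.map (fun c =>
      let e0 := c.toNat + 1
      let e := if e0 > 122 then e0 % 122 + 96 else e0
      let pre := (List.range' e (123 - e)).filter (fun o => !(skip.toList.contains (Char.ofNat o)))
      let k := pre.length
      if index ≤ (k : Int) then Char.ofNat (pre.getD (index.toNat - 1) 0)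
      else Char.ofNat (cyc.getD ((index.toNat - k - 1) % m) 0)))

-- ===== PRECONDITION & SPEC =====
-- Pre_ excludes positive index with nonempty s when skip contains every lowercase
-- letter: there A's while loop diverges for most starting characters and B raises
-- ZeroDivisionError; on the few such inputs where A does return, B returns the same
-- value (see cites).
def Pre_solution (s : String) (skip : String) (index : Int) : Prop :=
  index ≤ 0 ∨ s = "" ∨ ∃ n < 26, Char.ofNat (97 + n) ∉ skip.toList

instance (s : String) (skip : String) (index : Int) : Decidable (Pre_solution s skip index) := by
  unfold Pre_solution; infer_instance

def pvWitness_solution : String × String × Int := ("ab z", "bq", 3)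

def Spec_solution (s : String) (skip : String) (index : Int) (out : String) : Prop := out = solution_alt s skip index
instance (s : String) (skip : String) (index : Int) (out : String) : Decidable (Spec_solution s skip index out) := by unfold Spec_solution; infer_instance

-- ===== CLAIM (what is proved, stated in full; the proofs are below) =====
def Claim_equal_solution : Prop := ∀ (s : String) (skip : String) (index : Int), Dom_solution s skip index → Pre_solution s skip index → Spec_solution s skip index (solution s skip index)

-- ===== LEMMAS AND PROOFS =====

-- option-valued copy of A's loop used only in the proofs: `none` = fuel exhausted
def loopO (skip : List Char) : Nat → Char → Int → Option Char
  | 0, _, _ => none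
  | f + 1, i, j =>
    if j > 0 then
      let i' := stepA i
      if skip.contains i' then loopO skip f i' j
      else loopO skip f i' (j - 1)
    else some i

-- the allowed codes from a up to 122
def preL (L : List Char) (a : Nat) : List Nat :=
  (List.range' a (123 - a)).filter (fun o => !(L.contains (Char.ofNat o)))

theorem toNat_ofNat_small (n : Nat) (h : n < 55296) : (Char.ofNat n).toNat = n := by
  unfold Char.ofNat
  split
  · simp [Char.toNat, Char.ofNatAux]
  · rename_i hv; exact absurd (Or.inl (by omega)) hv

theorem loopO_succ (L : List Char) (f : Nat) (i : Char) (j : Int) :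
    loopO L (f + 1) i j =
      if j > 0 then
        (if L.contains (stepA i) then loopO L f (stepA i) j else loopO L f (stepA i) (j - 1))
      else some i := rfl

theorem loopA_succ (L : List Char) (f : Nat) (i : Char) (j : Int) :
    loopA L (f + 1) i j =
      if j > 0 then
        (if L.contains (stepA i) then loopA L f (stepA i) j else loopA L f (stepA i) (j - 1))
      else i := rfl

theorem loopO_sound (L : List Char) (f : Nat) (i : Char) (j : Int) (r : Char)
    (h : loopO L f i j = some r) : loopA L f i j = r := by
  induction f generalizing i j with
  | zero => simp [loopO] at h
  | succ f ih =>
    rw [loopO_succ] at h; rw [loopA_succ]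
    by_cases hj : j > 0
    · simp only [if_pos hj] at h ⊢
      by_cases hc : L.contains (stepA i)
      · simp only [if_pos hc] at h ⊢; exact ih _ _ h
      · simp only [if_neg hc] at h ⊢; exact ih _ _ h
    · simp only [if_neg hj] at h ⊢; exact (Option.some.inj h)

theorem loopO_mono (L : List Char) (f f' : Nat) (i : Char) (j : Int) (r : Char)
    (hle : f ≤ f') (h : loopO L f i j = some r) : loopO L f' i j = some r := by
  induction f generalizing f' i j with
  | zero => simp [loopO] at h
  | succ f ih =>
    obtain ⟨f'', rfl⟩ : ∃ f'', f' = f'' + 1 := ⟨f' - 1, by omega⟩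
    rw [loopO_succ] at h ⊢
    by_cases hj : j > 0
    · simp only [if_pos hj] at h ⊢
      by_cases hc : L.contains (stepA i)
      · simp only [if_pos hc] at h ⊢; exact ih _ _ _ (by omega) h
      · simp only [if_neg hc] at h ⊢; exact ih _ _ _ (by omega) h
    · simp only [if_neg hj] at h ⊢; exact h

theorem stepA_eq (c : Char) (h : c.toNat ≤ 126) :
    stepA c = Char.ofNat (if c.toNat + 1 > 122 then (c.toNat + 1) % 122 + 96 else c.toNat + 1) := by
  unfold stepA
  have h1 : (Char.ofNat (c.toNat + 1)).toNat = c.toNat + 1 := toNat_ofNat_small _ (by omega)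
  simp only [h1]
  by_cases hb : c.toNat + 1 > 122 <;> simp [hb]


theorem preL_cons (L : List Char) (a : Nat) (ha : a ≤ 122) :
    preL L a = if L.contains (Char.ofNat a) then preL L (a + 1)
               else a :: preL L (a + 1) := by
  unfold preL
  have h1 : 123 - a = (122 - a) + 1 := by omega
  rw [h1, List.range'_succ, List.filter_cons]
  have h2 : 123 - (a + 1) = 122 - a := by omega
  rw [h2]
  by_cases hc : L.contains (Char.ofNat a)
  · simp only [hc, Bool.not_true, Bool.false_eq_true, if_false, if_true]
  · simp only [hc, Bool.not_false, if_true, Bool.false_eq_true, if_false]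

theorem preL_empty (L : List Char) : preL L 123 = [] := by
  unfold preL; norm_num

-- linear phase: walking the segment [122-d .. 122] consumes the allowed codes of
-- preL L (122-d) one per decrement; if j outlives the segment, continue at code 122.
theorem lin (L : List Char) (d : Nat) (hd : d ≤ 121) (c : Char)
    (hc : stepA c = Char.ofNat (122 - d)) (j : Int) (hj : 1 ≤ j) (f : Nat) :
    loopO L (f + d + 2) c j =
      if j ≤ ((preL L (122 - d)).length : Int)
      then some (Char.ofNat ((preL L (122 - d)).getD (j.toNat - 1) 0))
      else loopO L (f + 1) (Char.ofNat 122) (j - (preL L (122 - d)).length) := by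
  induction d generalizing c j f with
  | zero =>
    have hpre := preL_cons L 122 (by omega)
    rw [preL_empty] at hpre
    have e1 : f + 0 + 2 = (f + 1) + 1 := by omega
    rw [e1, loopO_succ, if_pos (by omega : j > 0), hc, hpre]
    by_cases hcon : L.contains (Char.ofNat 122)
    · rw [if_pos hcon, if_pos hcon]
      simp only [List.length_nil, Nat.cast_zero, sub_zero]
      rw [if_neg (by omega)]
    · rw [if_neg hcon, if_neg hcon]
      by_cases hj1 : j ≤ 1
      · have hj1' : j = 1 := le_antisymm hj1 hj
        subst hj1'
        rw [show (1:Int) - 1 = 0 from rfl, loopO_succ, if_neg (by omega)]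
        rw [if_pos (by norm_num)]
        simp
      · rw [if_neg (by push_cast [List.length_cons, List.length_nil]; omega)]
        norm_num
  | succ d ih =>
    have hd' : d ≤ 121 := by omega
    have h122 : 122 - (d + 1) = 121 - d := by omega
    rw [h122] at hc ⊢
    have hto : (Char.ofNat (121 - d)).toNat = 121 - d := toNat_ofNat_small _ (by omega)
    have hstep : stepA (Char.ofNat (121 - d)) = Char.ofNat (122 - d) := by
      rw [stepA_eq _ (by omega), hto, if_neg (by omega)]
      congr 1
      omega
    have hpre := preL_cons L (121 - d) (by omega)
    rw [show (121 - d) + 1 = 122 - d from by omega] at hpre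
    have e1 : f + (d + 1) + 2 = (f + d + 2) + 1 := by omega
    rw [e1, loopO_succ, if_pos (by omega : j > 0), hc, hpre]
    by_cases hcon : L.contains (Char.ofNat (121 - d))
    · rw [if_pos hcon, if_pos hcon]
      exact ih hd' _ hstep j hj f
    · rw [if_neg hcon, if_neg hcon]
      by_cases hj1 : j ≤ 1
      · have hj1' : j = 1 := le_antisymm hj1 hj
        subst hj1'
        rw [show (1:Int) - 1 = 0 from rfl]
        have e2 : f + d + 2 = (f + d + 1) + 1 := by omega
        rw [e2, loopO_succ, if_neg (by omega),
          if_pos (by push_cast [List.length_cons, List.length_nil]; omega)]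
        simp
      · rw [ih hd' _ hstep (j - 1) (by omega) f]
        by_cases hle : j ≤ ((preL L (122 - d)).length : Int) + 1
        · rw [if_pos (by omega), if_pos (by push_cast [List.length_cons, List.length_nil]; omega)]
          have e3 : j.toNat - 1 = ((j - 1).toNat - 1) + 1 := by omega
          rw [e3]
          simp
        · rw [if_neg (by omega), if_neg (by push_cast [List.length_cons, List.length_nil]; omega)]
          congr 1
          simp only [List.length_cons]
          push_cast
          ring

theorem stepA_122 : stepA (Char.ofNat 122) = Char.ofNat 97 := by decide

-- cycle phase: from code 122 the loop revolves through preL L 97; j reduces mod its length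
theorem cyc_lem (L : List Char) (hm : preL L 97 ≠ []) (N : Nat) :
    ∀ (j : Int), 1 ≤ j → j.toNat ≤ N →
      loopO L (27 * N + 1) (Char.ofNat 122) j =
        some (Char.ofNat ((preL L 97).getD ((j.toNat - 1) % (preL L 97).length) 0)) := by
  induction N with
  | zero => intro j hj hN; omega
  | succ N ih =>
    intro j hj hN
    have hm1 : 1 ≤ (preL L 97).length := List.length_pos_of_ne_nil hm
    have hstep : stepA (Char.ofNat 122) = Char.ofNat (122 - 25) := by
      rw [stepA_122]
    have heq : 27 * (N + 1) + 1 = (27 * N + 1) + 25 + 2 := by omega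
    rw [heq, lin L 25 (by omega) _ hstep j hj (27 * N + 1)]
    rw [show (122 : Nat) - 25 = 97 from by norm_num]
    by_cases hle : j ≤ ((preL L 97).length : Int)
    · rw [if_pos hle, Nat.mod_eq_of_lt (by omega)]
    · rw [if_neg hle]
      have hrec := ih (j - ((preL L 97).length : Int)) (by omega) (by omega)
      have hmono := loopO_mono L (27 * N + 1) (27 * N + 1 + 1) _ _ _ (by omega) hrec
      rw [hmono,
        show j.toNat - 1 = ((j - ((preL L 97).length : Int)).toNat - 1) + (preL L 97).length
          from by omega,
        Nat.add_mod_right]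

-- one character of A's outer loop equals B's closed-form pick
theorem char_lem (skip : String) (hm : preL skip.toList 97 ≠ []) (c : Char) (e : Nat)
    (he : e = (if c.toNat + 1 > 122 then (c.toNat + 1) % 122 + 96 else c.toNat + 1))
    (h9 : 9 ≤ c.toNat) (hc : c.toNat ≤ 126) (j : Int) (hj : 1 ≤ j) :
    loopA skip.toList (27 * j.toNat + 120) c j =
      if j ≤ ((preL skip.toList e).length : Int)
      then Char.ofNat ((preL skip.toList e).getD (j.toNat - 1) 0)
      else Char.ofNat ((preL skip.toList 97).getD
        ((j.toNat - (preL skip.toList e).length - 1) % (preL skip.toList 97).length) 0) := by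
  have he1 : 10 ≤ e ∧ e ≤ 122 := by rw [he]; split_ifs <;> omega
  have hce : stepA c = Char.ofNat e := by rw [stepA_eq c hc, ← he]
  have hco : stepA c = Char.ofNat (122 - (122 - e)) := by rw [hce]; congr 1; omega
  apply loopO_sound
  have hlin := lin skip.toList (122 - e) (by omega) c hco j hj (27 * j.toNat + 118 - (122 - e))
  rw [show (27 * j.toNat + 118 - (122 - e)) + (122 - e) + 2 = 27 * j.toNat + 120 from by omega,
    show 122 - (122 - e) = e from by omega] at hlin
  rw [hlin]
  by_cases hle : j ≤ ((preL skip.toList e).length : Int)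
  · rw [if_pos hle, if_pos hle]
  · rw [if_neg hle, if_neg hle]
    have hrec := cyc_lem skip.toList hm j.toNat (j - ((preL skip.toList e).length : Int))
      (by omega) (by omega)
    have hmono := loopO_mono skip.toList (27 * j.toNat + 1)
      ((27 * j.toNat + 118 - (122 - e)) + 1) _ _ _ (by omega) hrec
    rw [hmono, show (j - ((preL skip.toList e).length : Int)).toNat - 1
      = j.toNat - (preL skip.toList e).length - 1 from by omega]

theorem foldl_push_toList (g : Char → Char) (l : List Char) (acc : String) :
    (l.foldl (fun a i => a.push (g i)) acc).toList = acc.toList ++ l.map g := by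
  induction l generalizing acc with
  | nil => simp
  | cons hd tl ih => simp [List.foldl, ih]

-- ===== VERDICT (by name: the statement is the Claim_ definition above) =====
theorem solution_spec : Claim_equal_solution := by
  intro s skip index hdom hpre
  unfold Spec_solution
  by_cases hidx : index ≤ 0
  · have halt : solution_alt s skip index = s := by unfold solution_alt; rw [if_pos hidx]
    rw [halt]
    unfold solution
    refine String.toList_inj.mp ?_
    rw [foldl_push_toList]
    have hid : ∀ c ∈ s.toList, loopA skip.toList (27 * index.toNat + 120) c index = c := by
      intro c _
      rw [show 27 * index.toNat + 120 = 119 + 1 from by omega, loopA_succ, if_neg (by omega)]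
    simp [List.map_congr_left hid]
  · rcases hpre with h | h | h
    · omega
    · subst h
      simp [solution, solution_alt, hidx]
    · obtain ⟨n, hn, hfree⟩ := h
      have hm : preL skip.toList 97 ≠ [] := by
        intro hnil
        have hmem : (97 + n) ∈ preL skip.toList 97 := by
          unfold preL
          rw [List.mem_filter]
          refine ⟨List.mem_range'_1.mpr ⟨by omega, by omega⟩, by simp [hfree]⟩
        rw [hnil] at hmem
        exact absurd hmem (List.not_mem_nil)
      have hdc : ∀ c ∈ s.toList, 9 ≤ c.toNat ∧ c.toNat ≤ 126 := by
        intro c hcm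
        have hd := hdom
        simp only [Dom_solution, pvDomStr, Bool.and_eq_true, List.all_eq_true] at hd
        have h1 := hd.1.1 c hcm
        simp only [pvDomChar, Bool.or_eq_true, Bool.and_eq_true, decide_eq_true_eq,
          beq_iff_eq] at h1
        omega
      refine String.toList_inj.mp ?_
      unfold solution solution_alt
      rw [if_neg (by omega), foldl_push_toList]
      simp only [String.toList_ofList, String.toList_empty, List.nil_append]
      apply List.map_congr_left
      intro c hcm
      obtain ⟨h9, h126⟩ := hdc c hcm
      rw [char_lem skip hm c _ rfl h9 h126 index (by omega)]
      rfl
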